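-- pv_equiv track=rewrite | github.com/sairambokka/TIP-102-1a | Week-2/is_authentic_collection.py | is_authentic_collection
-- ===== SOURCE A (Python) =====
-- def is_authentic_collection(art_pieces):
--     max_value = max(art_pieces)
--     if max_value == 1:
--         return art_pieces == [1, 1]
--     # 3 -> {1: 1, 2: 1, 3: 2}
--     count = {}
--     check1 = False
--     check2 = False
--     for num in art_pieces:
--         count[num] = count.get(num, 0) + 1
--     for key, value in count.items():
--         if key == max_value:
--             if value == 2:
--                 check1 = True
--         elif value == 1:
--             check2 = True
--
--     return check1 and check2
-- ===== SOURCE B (Python) =====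
-- def is_authentic_collection(art_pieces):
--     max_value = max(art_pieces)
--     if max_value == 1:
--         return art_pieces == [1, 1]
--     # Sort once, then a single run-length scan over the sorted list:
--     # the final run is the run of max_value (check its length is 2),
--     # and any earlier run of length 1 is a non-max value occurring once.
--     prev = None
--     run_len = 0
--     has_single_other = False
--     for v in sorted(art_pieces):
--         if v == prev:
--             run_len += 1
--         else:
--             if run_len == 1:
--                 has_single_other = True
--             prev, run_len = v, 1
--     return run_len == 2 and has_single_other
-- ===== Notes on version B (the rewrite author's own statement) =====
-- stated objective: alternative
-- what changed: Replaces A's frequency-dict build plus a second loop over dict items with a sort followed by a single run-length scan of the sorted list: the final run is the run of the maximum (its length must be 2) and any earlier run of length 1 marks a non-max value occurring exactly once; no counts are stored.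
import Mathlib
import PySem

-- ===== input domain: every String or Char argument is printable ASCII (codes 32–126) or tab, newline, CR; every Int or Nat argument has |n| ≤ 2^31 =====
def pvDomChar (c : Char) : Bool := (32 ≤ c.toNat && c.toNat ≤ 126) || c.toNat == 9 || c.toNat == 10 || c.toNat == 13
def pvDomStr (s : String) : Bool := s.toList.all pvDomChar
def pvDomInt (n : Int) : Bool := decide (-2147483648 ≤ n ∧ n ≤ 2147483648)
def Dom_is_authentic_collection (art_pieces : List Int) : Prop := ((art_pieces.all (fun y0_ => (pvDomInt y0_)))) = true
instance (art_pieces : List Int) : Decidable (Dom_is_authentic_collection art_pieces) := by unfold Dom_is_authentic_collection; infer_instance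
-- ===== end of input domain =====

-- B replaces A's frequency-dict build plus item-scan flag loop with one sort followed by a single
-- run-length scan of the sorted list (the final run is the max's run; an earlier length-1 run is a
-- unique non-max value) — an alternative sort-then-scan algorithm, not claimed faster.


-- ===== PORT A =====
def is_authentic_collection (art_pieces : List Int) : Bool :=
  match PySem.List.max? art_pieces (fun x => x) with
  | none => false  -- unreachable under Pre_ (Python raises ValueError on an empty list)
  | some max_value =>
    if max_value = 1 then decide (art_pieces = [1, 1])
    else
      let count := art_pieces.foldl (fun d num => d.insert num (d.getD num 0 + 1))
        (PySem.Dict.empty : PySem.Dict Int Int)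
      let cs := count.items.foldl (fun (c : Bool × Bool) kv =>
        if kv.1 = max_value then (if kv.2 = 2 then (true, c.2) else c)
        else if kv.2 = 1 then (c.1, true) else c) (false, false)
      cs.1 && cs.2

-- ===== PORT B =====
-- loop body of Source B: state = (prev, run_len, has_single_other); `v == prev` is False when prev is None
def pvStep (st : Option Int × Int × Bool) (v : Int) : Option Int × Int × Bool :=
  if (some v : Option Int) == st.1 then (st.1, st.2.1 + 1, st.2.2)
  else (some v, 1, st.2.2 || decide (st.2.1 = 1))

def is_authentic_collection_alt (art_pieces : List Int) : Bool :=
  match PySem.List.max? art_pieces (fun x => x) with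
  | none => false  -- unreachable under Pre_ (Python raises ValueError on an empty list)
  | some max_value =>
    if max_value = 1 then decide (art_pieces = [1, 1])
    else
      let st := (PySem.List.sorted art_pieces (fun x => x) false).foldl pvStep
        ((none : Option Int), (0 : Int), false)
      decide (st.2.1 = 2) && st.2.2

-- ===== PRECONDITION & SPEC =====
-- Pre_ excludes only the empty list, on which Python's max() raises ValueError.
def Pre_is_authentic_collection (art_pieces : List Int) : Prop := art_pieces ≠ []
instance (art_pieces : List Int) : Decidable (Pre_is_authentic_collection art_pieces) := by unfold Pre_is_authentic_collection; infer_instance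
def pvWitness_is_authentic_collection : List Int := [3, 3, 1, 2]
def Spec_is_authentic_collection (art_pieces : List Int) (out : Bool) : Prop := out = is_authentic_collection_alt art_pieces
instance (art_pieces : List Int) (out : Bool) : Decidable (Spec_is_authentic_collection art_pieces out) := by unfold Spec_is_authentic_collection; infer_instance

-- ===== CLAIM (what is proved, stated in full; the proofs are below) =====
def Claim_equal_is_authentic_collection : Prop := ∀ (art_pieces : List Int), Dom_is_authentic_collection art_pieces → Pre_is_authentic_collection art_pieces → Spec_is_authentic_collection art_pieces (is_authentic_collection art_pieces)

-- ===== LEMMAS AND PROOFS =====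

-- A's flag-setting loop over a pair list computes two 'any' tests.
theorem flags_foldl (m : Int) (l : List (Int × Int)) (c : Bool × Bool) :
    l.foldl (fun (c : Bool × Bool) kv =>
        if kv.1 = m then (if kv.2 = 2 then (true, c.2) else c)
        else if kv.2 = 1 then (c.1, true) else c) c
    = (c.1 || l.any (fun kv => decide (kv.1 = m) && decide (kv.2 = 2)),
       c.2 || l.any (fun kv => !decide (kv.1 = m) && decide (kv.2 = 1))) := by
  induction l generalizing c with
  | nil => simp
  | cons kv t ih =>
    simp only [List.foldl_cons, List.any_cons, ih]
    by_cases h1 : kv.1 = m <;> by_cases h2 : kv.2 = 2 <;> by_cases h3 : kv.2 = 1 <;>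
      simp [h1, h2, h3]

-- A's value in the non-special branch: counts of the max and of some other value.
theorem A_char (xs : List Int) (m : Int)
    (hmax : PySem.List.max? xs (fun x => x) = some m) (h1 : m ≠ 1) :
    is_authentic_collection xs
      = (decide (xs.count m = 2) && decide (∃ k ∈ xs, k ≠ m ∧ xs.count k = 1)) := by
  have hm : m ∈ xs := PySem.List.max?_mem hmax
  unfold is_authentic_collection
  rw [hmax]
  simp only [h1, if_false]
  rw [PySem.Dict.foldl_insert_getD_add_one_eq_counter, PySem.Dict.items_counter, flags_foldl]
  simp only [Bool.false_or]
  congr 1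
  · rw [Bool.eq_iff_iff]
    simp only [List.any_map, Function.comp_def, List.any_eq_true, Bool.and_eq_true,
      PySem.Set.mem_ofList, decide_eq_true_eq]
    constructor
    · rintro ⟨k, _, rfl, hk2⟩; exact_mod_cast hk2
    · intro hc; exact ⟨m, hm, rfl, by exact_mod_cast hc⟩
  · rw [Bool.eq_iff_iff]
    simp only [List.any_map, Function.comp_def, List.any_eq_true, Bool.and_eq_true,
      PySem.Set.mem_ofList, decide_eq_true_eq, Bool.not_eq_true', decide_eq_false_iff_not, ne_eq]
    constructor
    · rintro ⟨k, hk, hne, h1k⟩; exact ⟨k, hk, hne, by exact_mod_cast h1k⟩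
    · rintro ⟨k, hk, hne, h1k⟩; exact ⟨k, hk, hne, by exact_mod_cast h1k⟩

-- the 'has_single_other' flag B's scan has accumulated after a processed sorted prefix
def pvFlag (q : List Int) (l : Int) : Bool := decide (∃ k ∈ q, k ≠ l ∧ q.count k = 1)

-- Invariant of B's run-length scan: after a nonempty sorted prefix p with greatest value l,
-- the state is (some l, count of l in p, pvFlag p l); running the rest keeps this shape.
theorem run_fold (s : List Int) : ∀ (p : List Int) (l : Int), l ∈ p → (∀ x ∈ p, x ≤ l) →
    (p ++ s).Pairwise (· ≤ ·) →
    ∃ L, L ∈ p ++ s ∧ (∀ x ∈ p ++ s, x ≤ L) ∧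
      s.foldl pvStep (some l, (p.count l : Int), pvFlag p l)
        = (some L, ((p ++ s).count L : Int), pvFlag (p ++ s) L) := by
  induction s with
  | nil => intro p l hl hmax _; exact ⟨l, by simpa using hl, by simpa using hmax, by simp⟩
  | cons v t ih =>
    intro p l hl hmax hsorted
    have hpv : ∀ x ∈ p, x ≤ v := fun x hx =>
      (List.pairwise_append.mp hsorted).2.2 x hx v (by simp)
    have hlv : l ≤ v := hpv l hl
    have hsorted' : ((p ++ [v]) ++ t).Pairwise (· ≤ ·) := by
      simpa [List.append_assoc] using hsorted
    by_cases hv : v = l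
    · -- the current run continues
      subst hv
      have hcnt : ((p ++ [v]).count v : Int) = (p.count v : Int) + 1 := by
        rw [List.count_append]; push_cast; simp
      have hflag : pvFlag (p ++ [v]) v = pvFlag p v := by
        unfold pvFlag
        rw [decide_eq_decide]
        constructor
        · rintro ⟨k, hk, hkl, hc⟩
          rcases List.mem_append.mp hk with hk | hk
          · have h0 : List.count k [v] = 0 := List.count_eq_zero.mpr (by simp [hkl])
            rw [List.count_append, h0] at hc
            exact ⟨k, hk, hkl, by omega⟩
          · simp at hk; exact absurd hk hkl
        · rintro ⟨k, hk, hkl, hc⟩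
          have h0 : List.count k [v] = 0 := List.count_eq_zero.mpr (by simp [hkl])
          exact ⟨k, List.mem_append.mpr (Or.inl hk), hkl, by rw [List.count_append, h0]; omega⟩
      have hstep : pvStep (some v, (p.count v : Int), pvFlag p v) v
          = (some v, ((p ++ [v]).count v : Int), pvFlag (p ++ [v]) v) := by
        rw [hcnt, hflag]; simp [pvStep]
      rw [List.foldl_cons, hstep]
      obtain ⟨L, hL1, hL2, hL3⟩ := ih (p ++ [v]) v (by simp)
        (fun x hx => by rcases List.mem_append.mp hx with h | h
                        · exact hmax x h
                        · simp at h; omega) hsorted'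
      exact ⟨L, by simpa [List.append_assoc] using hL1,
             fun x hx => hL2 x (by simpa [List.append_assoc] using hx),
             by rw [hL3]; simp [List.append_assoc]⟩
    · -- a strictly larger value starts a new run
      have hvl : l < v := lt_of_le_of_ne hlv (fun h => hv h.symm)
      have hvnotp : v ∉ p := fun h => absurd (hmax v h) (by omega)
      have hcnt : ((p ++ [v]).count v : Int) = 1 := by
        rw [List.count_append, List.count_eq_zero.mpr hvnotp]; simp
      have hflag : pvFlag (p ++ [v]) v = (pvFlag p l || decide (p.count l = 1)) := by
        unfold pvFlag
        rw [Bool.eq_iff_iff]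
        simp only [Bool.or_eq_true, decide_eq_true_eq]
        constructor
        · rintro ⟨k, hk, hkv, hc⟩
          rcases List.mem_append.mp hk with hk | hk
          · have h0 : List.count k [v] = 0 := List.count_eq_zero.mpr (by simp [hkv])
            rw [List.count_append, h0] at hc
            by_cases hkl : k = l
            · right; rw [← hkl]; omega
            · left; exact ⟨k, hk, hkl, by omega⟩
          · simp at hk; exact absurd hk hkv
        · intro h
          rcases h with ⟨k, hk, hkl, hc⟩ | hc
          · have hkv : k ≠ v := fun h => by subst h; exact hvnotp hk
            have h0 : List.count k [v] = 0 := List.count_eq_zero.mpr (by simp [hkv])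
            exact ⟨k, List.mem_append.mpr (Or.inl hk), hkv, by rw [List.count_append, h0]; omega⟩
          · have hlvne : l ≠ v := by omega
            have h0 : List.count l [v] = 0 := List.count_eq_zero.mpr (by simp [hlvne])
            exact ⟨l, List.mem_append.mpr (Or.inl hl), hlvne, by rw [List.count_append, h0]; omega⟩
      have hstep : pvStep (some l, (p.count l : Int), pvFlag p l) v
          = (some v, ((p ++ [v]).count v : Int), pvFlag (p ++ [v]) v) := by
        rw [hcnt, hflag]
        have hne : ((some v : Option Int) == some l) = false := by simp [hv]
        simp [pvStep, hne]
      rw [List.foldl_cons, hstep]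
      obtain ⟨L, hL1, hL2, hL3⟩ := ih (p ++ [v]) v (by simp)
        (fun x hx => by rcases List.mem_append.mp hx with h | h
                        · exact le_of_lt (lt_of_le_of_lt (hmax x h) hvl)
                        · simp at h; omega) hsorted'
      exact ⟨L, by simpa [List.append_assoc] using hL1,
             fun x hx => hL2 x (by simpa [List.append_assoc] using hx),
             by rw [hL3]; simp [List.append_assoc]⟩

-- B's value in the non-special branch: the same two count conditions, via the sort's permutation.
theorem B_char (xs : List Int) (m : Int)
    (hmax : PySem.List.max? xs (fun x => x) = some m) (h1 : m ≠ 1) :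
    is_authentic_collection_alt xs
      = (decide (xs.count m = 2) && decide (∃ k ∈ xs, k ≠ m ∧ xs.count k = 1)) := by
  have hm : m ∈ xs := PySem.List.max?_mem hmax
  have hmtop : ∀ y ∈ xs, y ≤ m := by
    intro y hy; simpa using PySem.List.max?_isMax hmax y hy
  unfold is_authentic_collection_alt
  rw [hmax]
  simp only [h1, if_false]
  have hperm : (PySem.List.sorted xs (fun x => x) false).Perm xs := PySem.List.sorted_perm ..
  have hpair : (PySem.List.sorted xs (fun x => x) false).Pairwise (· ≤ ·) := by
    simpa using PySem.List.sorted_pairwise (xs := xs) (key := fun x => x)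
  cases hs : PySem.List.sorted xs (fun x => x) false with
  | nil =>
    exfalso
    rw [hs] at hperm
    have : xs = [] := hperm.symm.eq_nil
    simp [this] at hm
  | cons v t =>
    rw [hs] at hperm hpair
    -- first loop iteration from the initial (None, 0, False) state
    have hfirst : pvStep ((none : Option Int), (0 : Int), false) v
        = (some v, (([v].count v : Int)), pvFlag [v] v) := by
      simp [pvStep, pvFlag]
    have hsorted : ([v] ++ t).Pairwise (· ≤ ·) := by simpa using hpair
    obtain ⟨L, hL1, hL2, hL3⟩ := run_fold t [v] v (by simp) (by simp) hsorted
    simp only [List.foldl_cons, hfirst]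
    have hvt : ([v] ++ t) = v :: t := by simp
    rw [hvt] at hL1 hL2 hL3
    rw [hL3]
    -- L = m
    have hLm : L = m := by
      have h1 : L ≤ m := hmtop L (hperm.mem_iff.mp hL1)
      have h2 : m ≤ L := hL2 m (hperm.mem_iff.mpr hm)
      omega
    rw [hLm]
    have hcnt : (v :: t).count m = xs.count m := hperm.count_eq m
    congr 1
    · rw [Bool.eq_iff_iff]; simp only [decide_eq_true_eq]
      constructor
      · intro h; rw [← hcnt]; exact_mod_cast h
      · intro h; exact_mod_cast hcnt ▸ h
    · unfold pvFlag
      rw [decide_eq_decide]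
      constructor
      · rintro ⟨k, hk, hkm, hc⟩
        exact ⟨k, hperm.mem_iff.mp hk, hkm, by rw [← hperm.count_eq k]; exact hc⟩
      · rintro ⟨k, hk, hkm, hc⟩
        exact ⟨k, hperm.mem_iff.mpr hk, hkm, by rw [hperm.count_eq k]; exact hc⟩

-- ===== VERDICT (by name: the statement is the Claim_ definition above) =====
theorem is_authentic_collection_spec : Claim_equal_is_authentic_collection := by
  intro xs _ hpre
  unfold Spec_is_authentic_collection
  cases hmax : PySem.List.max? xs (fun x => x) with
  | none =>
    unfold is_authentic_collection is_authentic_collection_alt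
    rw [hmax]
  | some m =>
    by_cases h1 : m = 1
    · unfold is_authentic_collection is_authentic_collection_alt
      rw [hmax]; simp [h1]
    · rw [A_char xs m hmax h1, B_char xs m hmax h1]
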